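-- pv_equiv track=rewrite | github.com/hdavidoff/datathon23 | christies_scraper.py | sort_prices
-- ===== SOURCE A (Python) =====
-- def sort_prices(str_list):
--     realised = [item.split('\n')[1] for item in str_list[1::2]]
--     estimate = []
--     for item in [item.split('\n') for item in str_list[0::2]]:
--         if len(item) == 2:
--             estimate.append(item[1])
--         else:
--             estimate.append(None)
--     return realised, estimate
-- ===== SOURCE B (Python) =====
-- def sort_prices(str_list):
--     realised, estimate = [], []
--     for idx, item in enumerate(str_list):
--         parts = item.split('\n')
--         if idx % 2 == 1:
--             realised.append(parts[1])
--         else: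
--             estimate.append(parts[1] if len(parts) == 2 else None)
--     return realised, estimate
-- ===== Notes on version B (the rewrite author's own statement) =====
-- stated objective: simpler
-- what changed: One parity-dispatched pass over enumerate(str_list) replaces the two strided slices ([1::2], [0::2]) and the intermediate list of split lists.
import Mathlib
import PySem

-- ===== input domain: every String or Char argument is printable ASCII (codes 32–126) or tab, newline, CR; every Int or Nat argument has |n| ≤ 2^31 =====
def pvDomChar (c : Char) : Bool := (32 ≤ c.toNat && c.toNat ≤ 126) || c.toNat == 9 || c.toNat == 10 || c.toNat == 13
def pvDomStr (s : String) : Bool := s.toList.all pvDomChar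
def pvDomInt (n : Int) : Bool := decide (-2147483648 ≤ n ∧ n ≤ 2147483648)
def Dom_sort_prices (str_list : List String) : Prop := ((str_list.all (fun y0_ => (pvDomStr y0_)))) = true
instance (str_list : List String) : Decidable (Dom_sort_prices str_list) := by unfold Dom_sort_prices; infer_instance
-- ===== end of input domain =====

-- B makes one parity-dispatched pass over enumerate(str_list) instead of A's two strided slices; same return value wherever A does not raise.

-- ===== PORT A =====
-- item.split('\n'); sep is non-empty so split? is always some
def pvParts (item : String) : List String := (PySem.Str.split? item "\n").getD []

def sort_prices (str_list : List String) : List String × List (Option String) :=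
  -- pyGet? = none is Python's IndexError (excluded by Pre_), so the .getD "" default is never A's value
  let realised := ((PySem.List.slice? str_list (some 1) none 2).getD []).map
    (fun item => (PySem.List.pyGet? (pvParts item) 1).getD "")
  let estimate := (((PySem.List.slice? str_list (some 0) none 2).getD []).map
      (fun item => pvParts item)).foldl
    (fun acc item =>
      if item.length = 2 then acc ++ [some ((PySem.List.pyGet? item 1).getD "")]
      else acc ++ [(none : Option String)]) []
  (realised, estimate)

-- ===== PORT B =====
def sort_prices_alt (str_list : List String) : List String × List (Option String) :=
  (PySem.List.enumerate str_list 0).foldl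
    (fun (acc : List String × List (Option String)) p =>
      let parts := pvParts p.2
      if PySem.Int.mod p.1 2 = 1 then
        (acc.1 ++ [(PySem.List.pyGet? parts 1).getD ""], acc.2)
      else
        (acc.1, acc.2 ++ [if parts.length = 2
                          then some ((PySem.List.pyGet? parts 1).getD "") else none]))
    ([], [])

-- ===== PRECONDITION & SPEC =====
-- Pre_ excludes exactly the inputs where A raises IndexError: an odd-indexed string
-- with no '\n' makes split('\n')[1] fail (B raises there too).
def Pre_sort_prices (str_list : List String) : Prop :=
  ∀ p ∈ PySem.List.enumerate str_list 0, PySem.Int.mod p.1 2 = 1 → '\n' ∈ p.2.toList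
instance (str_list : List String) : Decidable (Pre_sort_prices str_list) := by
  unfold Pre_sort_prices; infer_instance
def pvWitness_sort_prices : List String := ["est\n100", "real\n200", "nosplit"]

def Spec_sort_prices (str_list : List String) (out : List String × List (Option String)) : Prop := out = sort_prices_alt str_list
instance (str_list : List String) (out : List String × List (Option String)) : Decidable (Spec_sort_prices str_list out) := by unfold Spec_sort_prices; infer_instance

-- ===== CLAIM (what is proved, stated in full; the proofs are below) =====
def Claim_equal_sort_prices : Prop := ∀ (str_list : List String), Dom_sort_prices str_list → Pre_sort_prices str_list → Spec_sort_prices str_list (sort_prices str_list)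

-- ===== LEMMAS AND PROOFS =====

-- elements at even positions (the proofs' common reference shape)
def pvEvens {α : Type} : List α → List α
  | [] => []
  | [a] => [a]
  | a :: _ :: t => a :: pvEvens t

def pvF (item : String) : String := (PySem.List.pyGet? (pvParts item) 1).getD ""

def pvG (item : String) : Option String :=
  if (pvParts item).length = 2 then some ((PySem.List.pyGet? (pvParts item) 1).getD "") else none

theorem pvEvens_cons {α : Type} (x : α) (t : List α) :
    pvEvens (x :: t) = x :: pvEvens t.tail := by
  cases t <;> rfl

theorem pvEvens_filterMap {α : Type} (xs : List α) :
    List.filterMap (fun k => xs[2 * k]?) (List.range ((xs.length + 1) / 2)) = pvEvens xs := by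
  induction xs using pvEvens.induct with
  | case1 => simp [pvEvens]
  | case2 a => simp [pvEvens]
  | case3 a b t ih =>
    have hlen : ((a :: b :: t).length + 1) / 2 = (t.length + 1) / 2 + 1 := by
      simp; omega
    rw [pvEvens, hlen, List.range_succ_eq_map, List.filterMap_cons, List.filterMap_map]
    have h0 : (a :: b :: t)[2 * 0]? = some a := by simp
    rw [h0]
    have h1 : ((fun k => (a :: b :: t)[2 * k]?) ∘ Nat.succ) = fun k => t[2 * k]? := by
      funext k
      have h2 : 2 * Nat.succ k = 2 * k + 1 + 1 := by omega
      simp [h2]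
    rw [h1, ih]

theorem pv_slice_evens (xs : List String) :
    (PySem.List.slice? xs (some 0) none 2).getD [] = pvEvens xs := by
  rw [PySem.List.slice?]
  simp only [PySem.List.sliceIndices]
  norm_num
  have hc : (if 0 < xs.length then (((xs.length : Int) + 2 - 1) / 2).toNat else 0)
      = (xs.length + 1) / 2 := by split <;> omega
  have hf : ∀ (x : Nat), ((2 * (x : Int)).toNat) = 2 * x := by intro x; omega
  rw [hc]
  simp only [hf]
  exact pvEvens_filterMap xs

theorem pv_slice_odds (xs : List String) :
    (PySem.List.slice? xs (some 1) none 2).getD [] = pvEvens xs.tail := by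
  rw [PySem.List.slice?]
  simp only [PySem.List.sliceIndices]
  norm_num
  cases xs with
  | nil => simp [pvEvens]
  | cons x t =>
    have hmin : min 1 (((x :: t).length : Int)) = 1 := by simp
    rw [hmin]
    have hc : (if 1 < (x :: t).length then ((((x :: t).length : Int) - 1 + 2 - 1) / 2).toNat else 0)
        = (t.length + 1) / 2 := by
      simp only [List.length_cons]; split <;> omega
    rw [hc]
    have hf : ∀ (k : Nat), (((1 : Int) + 2 * (k : Int)).toNat) = 2 * k + 1 := by intro k; omega
    simp only [hf, List.getElem?_cons_succ, List.tail_cons]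
    exact pvEvens_filterMap t

theorem pv_foldl_estimate (ys : List (List String)) (acc : List (Option String)) :
    ys.foldl (fun acc item =>
      if item.length = 2 then acc ++ [some ((PySem.List.pyGet? item 1).getD "")]
      else acc ++ [(none : Option String)]) acc
    = acc ++ ys.map (fun item =>
        if item.length = 2 then some ((PySem.List.pyGet? item 1).getD "") else none) := by
  induction ys generalizing acc with
  | nil => simp
  | cons y t ih => simp only [List.foldl_cons, List.map_cons]; split <;> simp [ih]

theorem pv_mod2 (j : Int) : PySem.Int.mod j 2 = j % 2 := by
  simp [PySem.Int.mod, Int.fmod_eq_emod]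

theorem pv_alt_go (xs : List String) :
    ∀ (i : Int), 0 ≤ i → ∀ (acc1 : List String) (acc2 : List (Option String)),
    (PySem.List.enumerate xs i).foldl
      (fun (acc : List String × List (Option String)) p =>
        let parts := pvParts p.2
        if PySem.Int.mod p.1 2 = 1 then
          (acc.1 ++ [(PySem.List.pyGet? parts 1).getD ""], acc.2)
        else
          (acc.1, acc.2 ++ [if parts.length = 2
                            then some ((PySem.List.pyGet? parts 1).getD "") else none]))
      (acc1, acc2)
    = if i % 2 = 1
      then (acc1 ++ (pvEvens xs).map pvF, acc2 ++ (pvEvens xs.tail).map pvG)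
      else (acc1 ++ (pvEvens xs.tail).map pvF, acc2 ++ (pvEvens xs).map pvG) := by
  induction xs with
  | nil =>
    intro i hi acc1 acc2
    simp [PySem.List.enumerate, pvEvens]
  | cons x t ih =>
    intro i hi acc1 acc2
    rw [PySem.List.enumerate_cons, List.foldl_cons]
    simp only [pv_mod2] at ih ⊢
    rcases Int.emod_two_eq i with h | h
    · have h1 : (i + 1) % 2 = 1 := by omega
      simp only [h]
      norm_num
      rw [ih (i + 1) (by omega), h1]
      simp [pvEvens_cons, pvG]
    · have h1 : (i + 1) % 2 = 0 := by omega
      simp only [h]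
      norm_num
      rw [ih (i + 1) (by omega), h1]
      simp [pvEvens_cons, pvF]

theorem pv_main (l : List String) : sort_prices l = sort_prices_alt l := by
  rw [sort_prices, sort_prices_alt, pv_alt_go l 0 (by omega)]
  simp only [pv_slice_evens, pv_slice_odds, pv_foldl_estimate]
  norm_num
  exact ⟨fun a _ => rfl, fun a _ => rfl⟩

-- ===== VERDICT (by name: the statement is the Claim_ definition above) =====
theorem sort_prices_spec : Claim_equal_sort_prices := by
  intro l _ _
  unfold Spec_sort_prices
  exact pv_main l
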